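-- pv_equiv track=rewrite | github.com/trandat812003/stt | src/ami/manifest_ami_dataset.py | collect_words
-- ===== SOURCE A (Python) =====
-- def collect_words(words, start_id, end_id):
--     collected = []
--     take = False
--     for w in words:
--         if w["id"] == start_id:
--             take = True
--         if take:
--             collected.append(w)
--         if w["id"] == end_id:
--             break
--     return collected
-- ===== SOURCE B (Python) =====
-- def collect_words(words, start_id, end_id):
--     prefix = []
--     for w in words:
--         prefix.append(w)
--         if w["id"] == end_id:
--             break
--     for i, w in enumerate(prefix):
--         if w["id"] == start_id:
--             return prefix[i:]
--     return []
-- ===== Notes on version B (the rewrite author's own statement) =====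
-- stated objective: alternative
-- what changed: Replaces A's single stateful scan (take flag + collector) with a two-phase decomposition: first cut the prefix up to and including the first end_id, then return the suffix of that prefix starting at the first start_id.
import Mathlib
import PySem

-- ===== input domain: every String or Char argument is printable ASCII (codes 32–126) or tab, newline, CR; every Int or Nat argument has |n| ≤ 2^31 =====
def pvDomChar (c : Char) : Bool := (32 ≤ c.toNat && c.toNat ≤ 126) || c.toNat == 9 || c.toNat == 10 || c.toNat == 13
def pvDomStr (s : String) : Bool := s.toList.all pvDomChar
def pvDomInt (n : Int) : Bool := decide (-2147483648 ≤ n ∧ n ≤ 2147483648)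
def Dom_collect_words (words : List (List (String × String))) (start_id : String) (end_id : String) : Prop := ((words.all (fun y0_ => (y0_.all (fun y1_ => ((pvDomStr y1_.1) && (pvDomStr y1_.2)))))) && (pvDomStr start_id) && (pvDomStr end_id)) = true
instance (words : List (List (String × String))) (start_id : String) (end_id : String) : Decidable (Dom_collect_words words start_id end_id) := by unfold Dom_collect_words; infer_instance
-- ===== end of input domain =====

-- B: two-phase decomposition (cut prefix at first end_id, then take the suffix from the
-- first start_id) instead of A's single stateful scan; same O(n) cost, no speed claim.

-- ===== PORT A =====
-- w["id"] is a first-match association-list lookup; Pre_ guarantees the key is present on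
-- every element A reads, so comparing the Option value is exact there.
def collect_words_loop (ws : List (List (String × String))) (start_id end_id : String)
    (collected : List (List (String × String))) (take : Bool) : List (List (String × String)) :=
  match ws with
  | [] => collected
  | w :: rest =>
    let take' := if (w.lookup "id" == some start_id) then true else take
    let collected' := if take' then collected ++ [w] else collected
    if (w.lookup "id" == some end_id) then collected'
    else collect_words_loop rest start_id end_id collected' take'

def collect_words (words : List (List (String × String))) (start_id : String) (end_id : String) : List (List (String × String)) :=
  collect_words_loop words start_id end_id [] false

-- ===== PORT B =====
-- phase 1: the prefix of words up to and including the first element whose id is end_id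
def cw_prefixTo (ws : List (List (String × String))) (end_id : String) : List (List (String × String)) :=
  match ws with
  | [] => []
  | w :: rest => w :: (if (w.lookup "id" == some end_id) then [] else cw_prefixTo rest end_id)

-- phase 2: the suffix of the prefix starting at the first element whose id is start_id
def cw_fromStart (ws : List (List (String × String))) (start_id : String) : List (List (String × String)) :=
  match ws with
  | [] => []
  | w :: rest => if (w.lookup "id" == some start_id) then w :: rest else cw_fromStart rest start_id

def collect_words_alt (words : List (List (String × String))) (start_id : String) (end_id : String) : List (List (String × String)) :=
  cw_fromStart (cw_prefixTo words end_id) start_id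

-- ===== PRECONDITION & SPEC =====
-- Pre_ excludes exactly the inputs where Python A raises KeyError: some element scanned
-- before (or at) the first end_id element lacks an "id" key.
def Pre_collect_words (words : List (List (String × String))) (start_id : String) (end_id : String) : Prop :=
  ∀ i < words.length,
    (∀ j < i, (words.getD j []).lookup "id" ≠ some end_id) →
    (words.getD i []).lookup "id" ≠ none

instance (words : List (List (String × String))) (start_id : String) (end_id : String) : Decidable (Pre_collect_words words start_id end_id) := by unfold Pre_collect_words; infer_instance

def pvWitness_collect_words : (List (List (String × String))) × String × String :=
  ([[("id", "a"), ("w", "hi")], [("id", "b"), ("w", "there")]], "a", "b")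

def Spec_collect_words (words : List (List (String × String))) (start_id : String) (end_id : String) (out : List (List (String × String))) : Prop := out = collect_words_alt words start_id end_id
instance (words : List (List (String × String))) (start_id : String) (end_id : String) (out : List (List (String × String))) : Decidable (Spec_collect_words words start_id end_id out) := by unfold Spec_collect_words; infer_instance

-- ===== CLAIM (what is proved, stated in full; the proofs are below) =====
def Claim_equal_collect_words : Prop := ∀ (words : List (List (String × String))) (start_id : String) (end_id : String), Dom_collect_words words start_id end_id → Pre_collect_words words start_id end_id → Spec_collect_words words start_id end_id (collect_words words start_id end_id)

-- ===== LEMMAS AND PROOFS =====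
-- Loop invariant: A's loop equals acc ++ (whole remaining prefix if take is set, else the
-- suffix of the prefix from the first start_id).
lemma collect_words_loop_eq (ws : List (List (String × String))) (s e : String) :
    ∀ (acc : List (List (String × String))) (take : Bool),
      collect_words_loop ws s e acc take =
        acc ++ (if take then cw_prefixTo ws e else cw_fromStart (cw_prefixTo ws e) s) := by
  induction ws with
  | nil => intro acc take; simp [collect_words_loop, cw_prefixTo, cw_fromStart]
  | cons w rest ih =>
    intro acc take
    simp only [collect_words_loop, cw_prefixTo]
    by_cases hs : (w.lookup "id" == some s) = true <;>
      by_cases he : (w.lookup "id" == some e) = true <;>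
      cases take <;>
      simp [hs, he, ih, cw_fromStart]

-- ===== VERDICT (by name: the statement is the Claim_ definition above) =====
theorem collect_words_spec : Claim_equal_collect_words := by
  intro words start_id end_id _ _
  unfold Spec_collect_words collect_words collect_words_alt
  simp [collect_words_loop_eq]
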